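-- pv_equiv track=rewrite | github.com/visserle/AnkiOps | ankiops/ai/runner.py | _select_decks_with_subdecks
-- ===== SOURCE A (Python) =====
-- from typing import Any, Iterable, Iterator, Protocol, runtime_checkable
--
-- def _select_decks_with_subdecks(
--     decks: list[dict[str, Any]],
--     include_decks: list[str] | None,
-- ) -> list[dict[str, Any]]:
--     targets = [name.strip() for name in (include_decks or []) if name.strip()]
--     if not targets:
--         return decks
--     return [
--         deck
--         for deck in decks
--         if any(
--             _matches_deck_or_subdeck(str(deck.get("name", "")), target)
--             for target in targets
--         )
--     ]
--
-- def _matches_deck_or_subdeck(deck_name: str, target: str) -> bool: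
--     return deck_name == target or deck_name.startswith(f"{target}::")
-- ===== SOURCE B (Python) =====
-- def _select_decks_with_subdecks(decks, include_decks):
--     targets = {t for t in (s.strip() for s in (include_decks or [])) if t}
--     if not targets:
--         return decks
--     result = []
--     for deck in decks:
--         name = str(deck.get("name", ""))
--         if name in targets:
--             result.append(deck)
--             continue
--         for i in range(len(name) - 1):
--             if name[i] == ':' and name[i + 1] == ':' and name[:i] in targets:
--                 result.append(deck)
--                 break
--     return result
-- ===== Notes on version B (the rewrite author's own statement) =====
-- stated objective: faster
-- what changed: B builds a hash set of the stripped targets once and, per deck, tests the full name plus each '::'-boundary prefix for set membership in a single scan of the name, instead of A's per-deck rescan of every target with equality/startswith.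
import Mathlib
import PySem

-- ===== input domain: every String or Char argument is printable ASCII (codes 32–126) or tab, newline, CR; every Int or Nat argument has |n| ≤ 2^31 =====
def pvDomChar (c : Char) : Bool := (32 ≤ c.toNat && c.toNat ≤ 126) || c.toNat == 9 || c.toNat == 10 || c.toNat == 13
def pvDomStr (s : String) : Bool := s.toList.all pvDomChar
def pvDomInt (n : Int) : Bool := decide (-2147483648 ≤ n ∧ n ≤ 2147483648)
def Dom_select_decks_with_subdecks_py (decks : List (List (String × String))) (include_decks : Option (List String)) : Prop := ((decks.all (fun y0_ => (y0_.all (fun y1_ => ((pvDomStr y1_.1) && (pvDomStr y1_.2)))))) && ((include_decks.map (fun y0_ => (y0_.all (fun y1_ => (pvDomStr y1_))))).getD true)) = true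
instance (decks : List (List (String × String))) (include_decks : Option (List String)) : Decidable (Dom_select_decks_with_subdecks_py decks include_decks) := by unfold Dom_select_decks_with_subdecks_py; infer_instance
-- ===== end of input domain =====

-- B replaces A's per-deck scan over every target with a target hash-set and one left-to-right scan
-- of each deck name over its "::" boundaries (asymptotically fewer string comparisons).
-- ===== PORT A =====
def pvMatchesDeckOrSubdeck (deck_name : String) (target : String) : Bool :=
  deck_name == target || PySem.Str.startswith deck_name (String.ofList (target.toList ++ [':', ':']))

def select_decks_with_subdecks_py (decks : List (List (String × String))) (include_decks : Option (List String)) : List (List (String × String)) :=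
  let targets := ((include_decks.getD []).map PySem.Str.strip).filter (fun t => t ≠ "")
  if targets.isEmpty then decks
  else decks.filter (fun deck =>
    targets.any (fun target =>
      pvMatchesDeckOrSubdeck ((PySem.Dict.mk deck).getD "name" "") target))

-- ===== PORT B =====
def pvHitName (targets : PySem.Set String) (name : String) : Bool :=
  targets.contains name ||
    (PySem.List.pyRange 0 (PySem.Str.len name - 1) 1).any (fun i =>
      (PySem.Str.pyGet? name i == some ':') &&
      (PySem.Str.pyGet? name (i + 1) == some ':') &&
      targets.contains (PySem.Str.slice name none (some i)))

def select_decks_with_subdecks_py_alt (decks : List (List (String × String))) (include_decks : Option (List String)) : List (List (String × String)) :=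
  let targets : PySem.Set String :=
    PySem.Set.ofList (((include_decks.getD []).map PySem.Str.strip).filter (fun t => t ≠ ""))
  if PySem.Set.len targets == 0 then decks
  else decks.filter (fun deck => pvHitName targets ((PySem.Dict.mk deck).getD "name" ""))

-- ===== PRECONDITION & SPEC =====
def Spec_select_decks_with_subdecks_py (decks : List (List (String × String))) (include_decks : Option (List String)) (out : List (List (String × String))) : Prop := out = select_decks_with_subdecks_py_alt decks include_decks
instance (decks : List (List (String × String))) (include_decks : Option (List String)) (out : List (List (String × String))) : Decidable (Spec_select_decks_with_subdecks_py decks include_decks out) := by unfold Spec_select_decks_with_subdecks_py; infer_instance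

-- ===== CLAIM (what is proved, stated in full; the proofs are below) =====
def Claim_equal_select_decks_with_subdecks_py : Prop := ∀ (decks : List (List (String × String))) (include_decks : Option (List String)), Dom_select_decks_with_subdecks_py decks include_decks → Spec_select_decks_with_subdecks_py decks include_decks (select_decks_with_subdecks_py decks include_decks)

-- ===== LEMMAS AND PROOFS =====

-- set(xs) is empty exactly when xs is
lemma pvOfList_eq_nil_iff (xs : List String) : PySem.Set.ofList xs = [] ↔ xs = [] := by
  constructor
  · intro h
    rw [List.eq_nil_iff_forall_not_mem]
    intro x hx
    have := (PySem.Set.mem_ofList xs x).2 hx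
    simp [h] at this
  · rintro rfl; rfl

-- "cs starts with t ++ '::'" ⟺ some index k carries ':' at k and k+1 and cs's k-prefix is t
lemma pvPrefix_pat_iff (cs t : List Char) :
    (t ++ [':', ':']) <+: cs ↔
      ∃ k : Nat, k + 1 < cs.length ∧ cs[k]? = some ':' ∧ cs[k + 1]? = some ':' ∧ cs.take k = t := by
  constructor
  · rintro ⟨r, hr⟩
    have hre : cs = t ++ (':' :: ':' :: r) := by rw [← hr]; simp
    refine ⟨t.length, ?_, ?_, ?_, ?_⟩
    · rw [hre]; simp only [List.length_append, List.length_cons]; omega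
    · rw [hre, List.getElem?_append_right (Nat.le_refl _)]; simp
    · rw [hre, List.getElem?_append_right (by omega)]
      simp only [Nat.add_sub_cancel_left]
      rfl
    · rw [hre, List.take_left]
  · rintro ⟨k, hk, h0, h1, ht⟩
    refine ⟨cs.drop (k + 2), ?_⟩
    have e0 : cs.drop k = ':' :: cs.drop (k + 1) := by
      rw [List.drop_eq_getElem_cons (by omega)]
      have hg : cs[k] = ':' := by
        have := List.getElem?_eq_getElem (l := cs) (i := k) (by omega)
        rw [this] at h0; exact Option.some.inj h0
      rw [hg]
    have e1 : cs.drop (k + 1) = ':' :: cs.drop (k + 2) := by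
      rw [List.drop_eq_getElem_cons (by omega)]
      have hg : cs[k + 1] = ':' := by
        have := List.getElem?_eq_getElem (l := cs) (i := k + 1) (by omega)
        rw [this] at h1; exact Option.some.inj h1
      rw [hg]
    calc t ++ [':', ':'] ++ cs.drop (k + 2)
        = cs.take k ++ cs.drop k := by rw [← ht, e0, e1]; simp
      _ = cs := List.take_append_drop k cs

lemma pvAny_eq_hit (L : List String) (name : String) :
    L.any (fun target => pvMatchesDeckOrSubdeck name target)
      = pvHitName (PySem.Set.ofList L) name := by
  rw [Bool.eq_iff_iff]
  unfold pvMatchesDeckOrSubdeck pvHitName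
  simp only [List.any_eq_true, Bool.or_eq_true, beq_iff_eq,
    PySem.Str.startswith_eq, PySem.Chars.startswith_iff, String.toList_ofList,
    PySem.Set.contains_iff, PySem.Set.mem_ofList, Bool.and_eq_true,
    PySem.List.mem_pyRange_one, PySem.Str.len_eq]
  constructor
  · rintro ⟨t, htL, h | h⟩
    · exact Or.inl (h ▸ htL)
    · right
      obtain ⟨k, hk, h0, h1, ht⟩ := (pvPrefix_pat_iff name.toList t.toList).1 h
      refine ⟨(k : Int), ⟨by omega, by omega⟩, ⟨?_, ?_⟩, ?_⟩
      · rw [PySem.Str.pyGet?_natCast]; exact h0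
      · rw [show ((k : Int) + 1) = ((k + 1 : Nat) : Int) by push_cast; ring,
          PySem.Str.pyGet?_natCast]
        exact h1
      · have hsl : PySem.Str.slice name none (some (k : Int)) = t := by
          apply String.toList_injective
          rw [PySem.Str.toList_slice]
          simp only [PySem.Chars.slice_eq_listSlice]
          rw [PySem.List.slice_to_natCast]
          exact ht
        rw [hsl]; exact htL
  · rintro (h | ⟨i, ⟨hi0, hi1⟩, ⟨h0, h1⟩, hmem⟩)
    · exact ⟨name, h, Or.inl rfl⟩
    · set t := PySem.Str.slice name none (some i) with hts
      refine ⟨t, hmem, Or.inr ?_⟩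
      set k := i.toNat with hk
      have hik : i = (k : Int) := by omega
      have htl : t.toList = name.toList.take k := by
        rw [hts, PySem.Str.toList_slice]
        simp only [PySem.Chars.slice_eq_listSlice]
        rw [hik, PySem.List.slice_to_natCast]
      rw [pvPrefix_pat_iff, htl]
      refine ⟨k, by omega, ?_, ?_, by simp⟩
      · rw [hik, PySem.Str.pyGet?_natCast] at h0; exact h0
      · rw [hik, show ((k : Int) + 1) = ((k + 1 : Nat) : Int) by push_cast; ring,
          PySem.Str.pyGet?_natCast] at h1
        exact h1

-- ===== VERDICT (by name: the statement is the Claim_ definition above) =====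
theorem select_decks_with_subdecks_py_spec : Claim_equal_select_decks_with_subdecks_py := by
  intro decks include_decks _
  unfold Spec_select_decks_with_subdecks_py select_decks_with_subdecks_py select_decks_with_subdecks_py_alt
  set L := ((include_decks.getD []).map PySem.Str.strip).filter (fun t => t ≠ "") with hL
  have hempty : L.isEmpty = (PySem.Set.len (PySem.Set.ofList L) == 0) := by
    rw [Bool.eq_iff_iff]
    simp only [List.isEmpty_iff, beq_iff_eq]
    rw [show PySem.Set.len (PySem.Set.ofList L) = ((PySem.Set.ofList L).length : Int) from rfl]
    rw [Int.natCast_eq_zero, List.length_eq_zero_iff, pvOfList_eq_nil_iff]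
  simp only [← hempty]
  by_cases h : L.isEmpty
  · simp [h]
  · simp only [h]
    apply List.filter_congr
    intro deck _
    exact pvAny_eq_hit L ((PySem.Dict.mk deck).getD "name" "")
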